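-- pv_equiv track=rewrite | github.com/23andMe/bonsaitree | bonsaitree/v3/pedigrees.py | remove_dangly_founders
-- ===== SOURCE A (Python) =====
-- def reverse_node_dict(
--     dct : dict[int, dict[int, int]],
-- ):
--     """
--     Reverse a node dict. If it's a down dict make it an up dict
--     and vice versa.
--
--     up_node_dict : {i : {anc1 : deg1, ...}, ...}
--     down_node_dict : {i : {desc1 : deg1, ...}, ...}
--     """
--
--     rev_dct = {}
--     for i,info in dct.items():
--         for a,d in info.items():
--             if a not in rev_dct:
--                 rev_dct[a] = {}
--             rev_dct[a][i] = d
--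
--     return rev_dct
--
-- def delete_nodes(up_node_dict, delete_set):
--     """
--     Delete each node in delete_set from up_node_dict.
--
--     Args:
--         up_node_dict: dict of the form {i : {p1 : d1, p2 : d2}, ...}
--         delete_set: set of nodes to delete
--
--     Returns:
--         new_up_dict: with nodes in delete_set removed.
--     """
--     new_up_dict = {}
--     for node,info in up_node_dict.items():
--         if node in delete_set:
--             continue
--         new_info = {p : d for p,d in info.items() if p not in delete_set}
--         new_up_dict[node] = new_info
--     return new_up_dict
--
-- def remove_dangly_founders(up_node_dict):
--     """
--     Remove founders who are not genotyped and who
--     have only one child.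
--
--     Args:
--         up_node_dict: dict of the form {i : {p1 : d1, p2 : d2}, ...}
--
--     Returns:
--         up_node_dict: with dangly founders removed.
--     """
--     while True:
--         dn_node_dict = reverse_node_dict(up_node_dict)
--         fid_set = {*dn_node_dict} - {*up_node_dict}
--         fid_with_one_child_set = {fid for fid in fid_set if len(dn_node_dict[fid]) == 1}
--         if len(fid_with_one_child_set) == 0:
--             break
--         up_node_dict = delete_nodes(up_node_dict, delete_set=fid_with_one_child_set)
--     return up_node_dict
-- ===== SOURCE B (Python) =====
-- def remove_dangly_founders(up_node_dict):
--     """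
--     Remove founders (nodes that appear only as parents) that have exactly
--     one child, in a single pass: count each parent's children once; a
--     deleted single-child founder can never create a new dangly founder,
--     so no fixed-point loop is needed.
--     """
--     child_count = {}
--     for info in up_node_dict.values():
--         for p in info:
--             child_count[p] = child_count.get(p, 0) + 1
--     delete_set = {p for p, c in child_count.items()
--                   if c == 1 and p not in up_node_dict}
--     return {node: {p: d for p, d in info.items() if p not in delete_set}
--             for node, info in up_node_dict.items()}
-- ===== Notes on version B (the rewrite author's own statement) =====
-- stated objective: simpler
-- what changed: Replaced A's fixed-point while-loop (rebuild the reversed dict and re-scan until no single-child ungenotyped founder remains) by a single child-count pass plus one filtered rebuild, which suffices because deleting a single-child founder never changes another parent's child count and never creates a new founder.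
import Mathlib
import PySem

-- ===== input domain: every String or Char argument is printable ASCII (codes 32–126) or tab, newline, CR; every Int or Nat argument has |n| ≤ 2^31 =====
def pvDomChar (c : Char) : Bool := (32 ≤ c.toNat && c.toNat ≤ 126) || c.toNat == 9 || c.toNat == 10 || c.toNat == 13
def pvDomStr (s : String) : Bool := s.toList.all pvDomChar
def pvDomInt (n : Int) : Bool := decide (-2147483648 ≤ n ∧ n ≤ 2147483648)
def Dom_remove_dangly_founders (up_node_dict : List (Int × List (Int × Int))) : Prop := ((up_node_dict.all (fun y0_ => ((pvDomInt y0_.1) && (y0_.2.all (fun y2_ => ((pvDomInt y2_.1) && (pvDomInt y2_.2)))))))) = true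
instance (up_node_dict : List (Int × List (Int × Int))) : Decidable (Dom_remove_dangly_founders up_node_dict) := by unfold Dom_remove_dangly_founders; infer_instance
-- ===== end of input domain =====

-- B replaces A's rebuild-and-retry while-loop by one child-count pass and one filtered rebuild
-- (deleting a single-child founder never creates a new one); objective: simpler.

-- ===== PORT A =====
-- Python sets of node ids are ported as lists of distinct elements (dict keys are already
-- distinct); the sets are only used for membership and cardinality, so list order is unobservable.
def reverse_node_dict (dct : List (Int × List (Int × Int))) : PySem.Dict Int (PySem.Dict Int Int) :=
  dct.foldl
    (fun rev_dct y =>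
      y.2.foldl
        (fun rev_dct pd =>
          (if rev_dct.contains pd.1 then rev_dct else rev_dct.insert pd.1 PySem.Dict.empty).modify
            pd.1 PySem.Dict.empty (fun inner => inner.insert y.1 pd.2))
        rev_dct)
    PySem.Dict.empty

def delete_nodes (up_node_dict : List (Int × List (Int × Int))) (delete_set : List Int) :
    List (Int × List (Int × Int)) :=
  up_node_dict.foldl
    (fun new_up_dict y =>
      if delete_set.contains y.1 then new_up_dict
      else new_up_dict ++ [(y.1, y.2.filter (fun pd => !delete_set.contains pd.1))])
    []

-- A's 'while True' loop; the fuel argument only makes the recursion total and is chosen large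
-- enough that it is never exhausted on the inputs admitted by Pre_ (proved below).
def rdf_loop : Nat → List (Int × List (Int × Int)) → List (Int × List (Int × Int))
  | 0, up_node_dict => up_node_dict
  | fuel + 1, up_node_dict =>
    let dn_node_dict := reverse_node_dict up_node_dict
    let fid_set := dn_node_dict.keys.filter (fun fid => !(up_node_dict.map (·.1)).contains fid)
    let fid_with_one_child_set :=
      fid_set.filter (fun fid => (dn_node_dict.getD fid PySem.Dict.empty).size == 1)
    if fid_with_one_child_set.length == 0 then up_node_dict
    else rdf_loop fuel (delete_nodes up_node_dict fid_with_one_child_set)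

def remove_dangly_founders (up_node_dict : List (Int × List (Int × Int))) :
    List (Int × List (Int × Int)) :=
  rdf_loop (up_node_dict.length + 1) up_node_dict

-- ===== PORT B =====
def remove_dangly_founders_alt (up_node_dict : List (Int × List (Int × Int))) :
    List (Int × List (Int × Int)) :=
  let child_count : PySem.Dict Int Int :=
    up_node_dict.foldl
      (fun child_count y =>
        y.2.foldl (fun child_count pd => child_count.insert pd.1 (child_count.getD pd.1 0 + 1))
          child_count)
      PySem.Dict.empty
  let delete_set : List Int :=
    (child_count.items.filter
      (fun pc => pc.2 == 1 && !(up_node_dict.map (·.1)).contains pc.1)).map (·.1)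
  up_node_dict.map (fun y => (y.1, y.2.filter (fun pd => !delete_set.contains pd.1)))

-- ===== PRECONDITION & SPEC =====
-- Pre_ asks that the association list really encodes a Python dict of dicts: outer keys distinct
-- and the keys of every inner dict distinct — duplicate keys cannot arise from a Python dict.
def Pre_remove_dangly_founders (up_node_dict : List (Int × List (Int × Int))) : Prop :=
  (up_node_dict.map (·.1)).Nodup ∧ ∀ y ∈ up_node_dict, (y.2.map (·.1)).Nodup
instance (up_node_dict : List (Int × List (Int × Int))) : Decidable (Pre_remove_dangly_founders up_node_dict) := by unfold Pre_remove_dangly_founders; infer_instance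

def pvWitness_remove_dangly_founders : (List (Int × List (Int × Int))) := [(1, [(2, 1), (3, 1)])]

def Spec_remove_dangly_founders (up_node_dict : List (Int × List (Int × Int))) (out : List (Int × List (Int × Int))) : Prop := out = remove_dangly_founders_alt up_node_dict
instance (up_node_dict : List (Int × List (Int × Int))) (out : List (Int × List (Int × Int))) : Decidable (Spec_remove_dangly_founders up_node_dict out) := by unfold Spec_remove_dangly_founders; infer_instance

-- ===== CLAIM (what is proved, stated in full; the proofs are below) =====
def Claim_equal_remove_dangly_founders : Prop := ∀ (up_node_dict : List (Int × List (Int × Int))), Dom_remove_dangly_founders up_node_dict → Pre_remove_dangly_founders up_node_dict → Spec_remove_dangly_founders up_node_dict (remove_dangly_founders up_node_dict)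

-- ===== LEMMAS AND PROOFS =====

-- the multiset of parent ids, the outer keys, the canonical "dangly founder" predicate
def pvParents (up : List (Int × List (Int × Int))) : List Int :=
  up.flatMap (fun y => y.2.map (·.1))
def pvKeys (up : List (Int × List (Int × Int))) : List Int := up.map (·.1)
def pvDel (up : List (Int × List (Int × Int))) (x : Int) : Prop :=
  (pvParents up).count x = 1 ∧ x ∉ pvKeys up
-- the (child, degree) pairs that reverse_node_dict accumulates under outer key x, in order
def pvOcc (x : Int) (up : List (Int × List (Int × Int))) : List (Int × Int) :=
  up.flatMap (fun y => (y.2.filter (fun pd => pd.1 == x)).map (fun pd => (y.1, pd.2)))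
-- A's first delete set and B's delete set, as standalone terms
def pvFidOne (up : List (Int × List (Int × Int))) : List Int :=
  ((reverse_node_dict up).keys.filter (fun fid => !(up.map (·.1)).contains fid)).filter
    (fun fid => ((reverse_node_dict up).getD fid PySem.Dict.empty).size == 1)
def pvDelSet (up : List (Int × List (Int × Int))) : List Int :=
  ((up.foldl
      (fun child_count y =>
        y.2.foldl (fun child_count pd => child_count.insert pd.1 (child_count.getD pd.1 0 + 1))
          child_count)
      (PySem.Dict.empty : PySem.Dict Int Int)).items.filter
    (fun pc => pc.2 == 1 && !(up.map (·.1)).contains pc.1)).map (·.1)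

lemma pv_len_filter_eq_count (l : List (Int × Int)) (x : Int) :
    (l.filter (fun pd => pd.1 == x)).length = (l.map (·.1)).count x := by
  rw [← List.countP_eq_length_filter]
  simp [List.count, List.countP_map]
  rfl

lemma pv_rev_step_getD (rev : PySem.Dict Int (PySem.Dict Int Int)) (a i d x : Int) :
    ((if rev.contains a then rev else rev.insert a PySem.Dict.empty).modify a PySem.Dict.empty
        (fun inner => inner.insert i d)).getD x PySem.Dict.empty
      = if x = a then (rev.getD a PySem.Dict.empty).insert i d else rev.getD x PySem.Dict.empty := by
  by_cases hc : rev.contains a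
  · simp [hc, PySem.Dict.getD_modify]
  · have hcf : rev.contains a = false := by simpa using hc
    have hge : rev.getD a PySem.Dict.empty = PySem.Dict.empty :=
      PySem.Dict.getD_of_not_contains _ _ hcf
    by_cases hx : x = a
    · simp [hc, hx, hge]
    · simp [hc, hx, PySem.Dict.getD_modify, PySem.Dict.getD_insert]

lemma pv_rev_inner_getD (info : List (Int × Int)) (i : Int)
    (rev : PySem.Dict Int (PySem.Dict Int Int)) (x : Int) :
    (info.foldl
        (fun rev_dct pd =>
          (if rev_dct.contains pd.1 then rev_dct else rev_dct.insert pd.1 PySem.Dict.empty).modify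
            pd.1 PySem.Dict.empty (fun inner => inner.insert i pd.2))
        rev).getD x PySem.Dict.empty
      = ((info.filter (fun pd => pd.1 == x)).map (fun pd => (i, pd.2))).foldl
          (fun inner pd => inner.insert pd.1 pd.2) (rev.getD x PySem.Dict.empty) := by
  induction info generalizing rev with
  | nil => rfl
  | cons pd t ih =>
    simp only [List.foldl_cons, ih, pv_rev_step_getD, List.filter_cons]
    by_cases hx : pd.1 = x
    · simp [hx]
    · rw [if_neg (by simpa using hx : ¬(pd.1 == x) = true)]
      rw [if_neg (fun h => hx h.symm)]

lemma pv_rev_getD (up : List (Int × List (Int × Int)))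
    (rev : PySem.Dict Int (PySem.Dict Int Int)) (x : Int) :
    (up.foldl
        (fun rev_dct y =>
          y.2.foldl
            (fun rev_dct pd =>
              (if rev_dct.contains pd.1 then rev_dct else
                rev_dct.insert pd.1 PySem.Dict.empty).modify
                pd.1 PySem.Dict.empty (fun inner => inner.insert y.1 pd.2))
            rev_dct)
        rev).getD x PySem.Dict.empty
      = (pvOcc x up).foldl (fun inner pd => inner.insert pd.1 pd.2) (rev.getD x PySem.Dict.empty) := by
  induction up generalizing rev with
  | nil => rfl
  | cons y t ih =>
    simp only [List.foldl_cons, pvOcc, List.flatMap_cons, List.foldl_append]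
    rw [ih, pv_rev_inner_getD]
    rfl

lemma pv_rev_inner_contains (info : List (Int × Int)) (i : Int)
    (rev : PySem.Dict Int (PySem.Dict Int Int)) (x : Int) :
    (info.foldl
        (fun rev_dct pd =>
          (if rev_dct.contains pd.1 then rev_dct else rev_dct.insert pd.1 PySem.Dict.empty).modify
            pd.1 PySem.Dict.empty (fun inner => inner.insert i pd.2))
        rev).contains x
      = (rev.contains x || (info.map (·.1)).contains x) := by
  induction info generalizing rev with
  | nil => simp
  | cons pd t ih =>
    have hstep : ∀ (r : PySem.Dict Int (PySem.Dict Int Int)),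
        ((if r.contains pd.1 then r else r.insert pd.1 PySem.Dict.empty).modify pd.1
            PySem.Dict.empty (fun inner => inner.insert i pd.2)).contains x
          = (x == pd.1 || r.contains x) := by
      intro r
      by_cases hc : r.contains pd.1 <;>
        simp [hc, PySem.Dict.contains_modify, PySem.Dict.contains_insert]
    simp only [List.foldl_cons, ih, hstep, List.map_cons, List.contains_cons]
    cases rev.contains x <;> cases (x == pd.1) <;> simp

lemma pv_rev_contains (up : List (Int × List (Int × Int))) (x : Int) :
    (reverse_node_dict up).contains x = (pvParents up).contains x := by
  have hgen : ∀ (u : List (Int × List (Int × Int))) (rev : PySem.Dict Int (PySem.Dict Int Int)),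
      (u.foldl
          (fun rev_dct y =>
            y.2.foldl
              (fun rev_dct pd =>
                (if rev_dct.contains pd.1 then rev_dct else
                  rev_dct.insert pd.1 PySem.Dict.empty).modify
                  pd.1 PySem.Dict.empty (fun inner => inner.insert y.1 pd.2))
              rev_dct)
          rev).contains x = (rev.contains x || (pvParents u).contains x) := by
    intro u
    induction u with
    | nil => simp [pvParents]
    | cons y t ih =>
      intro rev
      simp only [List.foldl_cons, ih, pv_rev_inner_contains, pvParents, List.flatMap_cons,
        List.contains_append]
      cases rev.contains x <;> cases (y.2.map (·.1)).contains x <;> simp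
  have h := hgen up PySem.Dict.empty
  simpa [reverse_node_dict, PySem.Dict.contains_empty] using h

lemma pv_size_foldl_insert (L : List (Int × Int)) (d : PySem.Dict Int Int)
    (hnd : (L.map (·.1)).Nodup) (hfresh : ∀ p ∈ L, d.contains p.1 = false) :
    (L.foldl (fun dd pd => dd.insert pd.1 pd.2) d).size = d.size + L.length := by
  induction L generalizing d with
  | nil => simp
  | cons p t ih =>
    rw [List.map_cons] at hnd
    have hfp : d.contains p.1 = false := hfresh p (by simp)
    have hs : (d.insert p.1 p.2).size = d.size + 1 := by
      simp [PySem.Dict.size_insert, hfp]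
    have hnotmem : p.1 ∉ t.map (·.1) := (List.nodup_cons.mp hnd).1
    have hfresh2 : ∀ q ∈ t, (d.insert p.1 p.2).contains q.1 = false := by
      intro q hq
      have hne : q.1 ≠ p.1 := by
        intro h; exact hnotmem (h ▸ List.mem_map_of_mem hq)
      simp [PySem.Dict.contains_insert, hne, hfresh q (List.mem_cons_of_mem _ hq)]
    have := ih (d.insert p.1 p.2) (List.nodup_cons.mp hnd).2 hfresh2
    simp only [List.foldl_cons, this, hs, List.length_cons]
    omega

lemma pv_occ_length (x : Int) (up : List (Int × List (Int × Int))) :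
    (pvOcc x up).length = (pvParents up).count x := by
  induction up with
  | nil => rfl
  | cons y t ih =>
    simp only [pvOcc, pvParents, List.flatMap_cons, List.length_append, List.count_append,
      List.length_map]
    have h := pv_len_filter_eq_count y.2 x
    simp only [pvOcc, pvParents] at ih
    omega

lemma pv_occ_fst_sublist (x : Int) (up : List (Int × List (Int × Int)))
    (hin : ∀ y ∈ up, (y.2.map (·.1)).Nodup) :
    ((pvOcc x up).map (·.1)).Sublist (pvKeys up) := by
  induction up with
  | nil => simp [pvOcc, pvKeys]
  | cons y t ih =>
    have hnd := hin y (by simp)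
    have hle : (y.2.filter (fun pd => pd.1 == x)).length ≤ 1 := by
      have h1 := List.nodup_iff_count_le_one.mp hnd x
      have h2 := pv_len_filter_eq_count y.2 x
      omega
    have ihtail := ih (fun z hz => hin z (List.mem_cons_of_mem _ hz))
    have ihtail2 : ((t.flatMap
        (fun y => (y.2.filter (fun pd => pd.1 == x)).map (fun pd => (y.1, pd.2)))).map
          (·.1)).Sublist (t.map (·.1)) := ihtail
    show (((y.2.filter (fun pd => pd.1 == x)).map (fun pd => (y.1, pd.2)) ++
        t.flatMap (fun y => (y.2.filter (fun pd => pd.1 == x)).map (fun pd => (y.1, pd.2)))).map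
          (·.1)).Sublist (y.1 :: t.map (·.1))
    rw [List.map_append]
    rcases hfil : y.2.filter (fun pd => pd.1 == x) with _ | ⟨p, rest⟩
    · rw [hfil]
      simpa using List.Sublist.cons y.1 ihtail2
    · have hrest : rest = [] := by
        rw [hfil] at hle; simpa using hle
      subst hrest
      rw [hfil]
      simpa using List.Sublist.cons₂ y.1 ihtail2

lemma pv_rev_size (up : List (Int × List (Int × Int))) (x : Int)
    (hpre : Pre_remove_dangly_founders up) :
    ((reverse_node_dict up).getD x PySem.Dict.empty).size = (pvParents up).count x := by
  have h2 : ((pvOcc x up).map (·.1)).Nodup :=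
    (pv_occ_fst_sublist x up hpre.2).nodup hpre.1
  have h3 : ∀ p ∈ pvOcc x up, (PySem.Dict.empty : PySem.Dict Int Int).contains p.1 = false := by
    intro p _; simp [PySem.Dict.contains_empty]
  unfold reverse_node_dict
  rw [pv_rev_getD, PySem.Dict.getD_empty, pv_size_foldl_insert _ _ h2 h3, pv_occ_length]
  simp [PySem.Dict.size_empty]

lemma pv_mem_fidOne (up : List (Int × List (Int × Int))) (x : Int)
    (hpre : Pre_remove_dangly_founders up) :
    x ∈ pvFidOne up ↔ pvDel up x := by
  have hk : x ∈ (reverse_node_dict up).keys ↔ (reverse_node_dict up).contains x = true :=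
    (PySem.Dict.contains_iff_mem_keys _ _).symm
  unfold pvFidOne pvDel
  simp only [List.mem_filter, hk, pv_rev_contains, pv_rev_size up x hpre, pvKeys,
    Nat.beq_eq_true_eq, Bool.not_eq_true', List.contains_eq_mem, decide_eq_true_eq,
    decide_eq_false_iff_not]
  constructor
  · rintro ⟨⟨_, h2⟩, h3⟩; exact ⟨h3, h2⟩
  · rintro ⟨h1, h2⟩
    exact ⟨⟨List.count_pos_iff.mp (by omega), h2⟩, h1⟩

lemma pv_foldl_flatMap {γ : Type} (l : List (Int × List (Int × Int)))
    (g : γ → (Int × Int) → γ) (e : γ) :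
    l.foldl (fun d y => y.2.foldl g d) e = (l.flatMap (fun y => y.2)).foldl g e := by
  induction l generalizing e with
  | nil => rfl
  | cons h t ih => simp [List.foldl_append, ih]

lemma pv_map_fst_filter (l : List (Int × Int)) (q : Int → Bool) :
    (l.filter (fun pd => q pd.1)).map (·.1) = (l.map (·.1)).filter q := by
  induction l with
  | nil => rfl
  | cons h t ih => by_cases hq : q h.1 <;> simp [hq, ih]

lemma pv_filter_flatMap (l : List (Int × List (Int × Int))) (h : Int × List (Int × Int) → List Int)
    (p : Int → Bool) :
    (l.flatMap h).filter p = l.flatMap (fun a => (h a).filter p) := by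
  induction l with
  | nil => rfl
  | cons y t ih => simp [List.filter_append, ih]

lemma pv_mem_delSet (up : List (Int × List (Int × Int))) (x : Int) :
    x ∈ pvDelSet up ↔ pvDel up x := by
  have hflat : (up.foldl
      (fun child_count y =>
        y.2.foldl (fun child_count pd => child_count.insert pd.1 (child_count.getD pd.1 0 + 1))
          child_count)
      PySem.Dict.empty) = PySem.Dict.counter (pvParents up) := by
    rw [pv_foldl_flatMap, ← PySem.Dict.foldl_insert_getD_add_one_eq_counter, pvParents,
      ← List.map_flatMap, List.foldl_map]
  have hDS2 : pvDelSet up = ((PySem.Dict.counter (pvParents up)).items.filter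
      (fun pc => pc.2 == 1 && !(up.map (·.1)).contains pc.1)).map (·.1) := by
    unfold pvDelSet
    exact congrArg
      (fun d : PySem.Dict Int Int =>
        ((d.items.filter (fun pc => pc.2 == 1 && !(up.map (·.1)).contains pc.1)).map (·.1)))
      hflat
  unfold pvDel
  rw [hDS2]
  simp only [PySem.Dict.items_counter, List.mem_map, List.mem_filter, PySem.Set.mem_ofList,
    pvKeys, Bool.and_eq_true, beq_iff_eq, Bool.not_eq_true', List.contains_eq_mem,
    decide_eq_false_iff_not]
  constructor
  · rintro ⟨pc, ⟨⟨k, hk1, rfl⟩, h2, h3⟩, rfl⟩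
    dsimp only at h2 h3 ⊢
    exact ⟨by exact_mod_cast h2, h3⟩
  · rintro ⟨h1, h2⟩
    refine ⟨(x, ((pvParents up).count x : Int)),
      ⟨⟨x, List.count_pos_iff.mp (by omega), rfl⟩, ?_, ?_⟩, rfl⟩
    · dsimp only
      exact_mod_cast h1
    · dsimp only
      exact h2

lemma pv_delete_nodes_eq (up : List (Int × List (Int × Int))) (S : List Int)
    (hkeys : ∀ y ∈ up, S.contains y.1 = false) :
    delete_nodes up S = up.map (fun y => (y.1, y.2.filter (fun pd => !S.contains pd.1))) := by
  have hgo : ∀ (u : List (Int × List (Int × Int))) (acc : List (Int × List (Int × Int))),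
      (∀ y ∈ u, S.contains y.1 = false) →
      u.foldl
        (fun new_up_dict y =>
          if S.contains y.1 then new_up_dict
          else new_up_dict ++ [(y.1, y.2.filter (fun pd => !S.contains pd.1))])
        acc
      = acc ++ u.map (fun y => (y.1, y.2.filter (fun pd => !S.contains pd.1))) := by
    intro u
    induction u with
    | nil => simp
    | cons y t ih =>
      intro acc hk
      have hy : S.contains y.1 = false := hk y (by simp)
      simp only [List.foldl_cons, List.map_cons, hy]
      rw [if_neg (by simp)]
      rw [ih _ (fun z hz => hk z (List.mem_cons_of_mem _ hz))]
      simp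
  simpa [delete_nodes] using hgo up [] hkeys

-- ===== VERDICT (by name: the statement is the Claim_ definition above) =====
theorem remove_dangly_founders_spec : Claim_equal_remove_dangly_founders := by
  intro up _ hpre
  unfold Spec_remove_dangly_founders
  have hBalt : remove_dangly_founders_alt up
      = up.map (fun y => (y.1, y.2.filter (fun pd => !(pvDelSet up).contains pd.1))) := by
    simp only [remove_dangly_founders_alt, pvDelSet]
    try rfl
  have hloop : ∀ (fuel : Nat) (u : List (Int × List (Int × Int))),
      rdf_loop (fuel + 1) u =
        if (pvFidOne u).length == 0 then u
        else rdf_loop fuel (delete_nodes u (pvFidOne u)) := by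
    intro fuel u; rfl
  have hmemF : ∀ z, z ∈ pvFidOne up ↔ pvDel up z := fun z => pv_mem_fidOne up z hpre
  unfold remove_dangly_founders
  rw [hBalt, hloop]
  by_cases hS : pvFidOne up = []
  · rw [hS]
    have hDS : pvDelSet up = [] := by
      rw [List.eq_nil_iff_forall_not_mem]
      intro z hz
      have hmem : z ∈ pvFidOne up := (hmemF z).mpr ((pv_mem_delSet up z).mp hz)
      rw [hS] at hmem
      exact List.not_mem_nil hmem
    rw [hDS]
    simp
  · -- first delete set nonempty: one deletion pass, then the loop detects emptiness
    have hkeysF : ∀ y ∈ up, (pvFidOne up).contains y.1 = false := by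
      intro y hy
      rw [Bool.eq_false_iff]
      intro hcon
      have hmem : y.1 ∈ pvFidOne up := by simpa [List.contains_eq_mem] using hcon
      exact ((hmemF y.1).mp hmem).2 (List.mem_map_of_mem hy)
    have hne : ((pvFidOne up).length == 0) = false := by
      simpa [List.length_eq_zero_iff] using hS
    rw [hne]
    simp only [Bool.false_eq_true, if_false]
    rw [pv_delete_nodes_eq up (pvFidOne up) hkeysF]
    set F := pvFidOne up with hF
    set up' := up.map (fun y => (y.1, y.2.filter (fun pd => !F.contains pd.1))) with hup'
    -- the two delete sets agree, so B's output is exactly up'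
    have hFD : ∀ p : Int, F.contains p = (pvDelSet up).contains p := by
      intro p
      rw [Bool.eq_iff_iff]
      simp only [List.contains_iff_mem, hF]
      rw [hmemF p, pv_mem_delSet]
    have hBup' : up.map (fun y => (y.1, y.2.filter (fun pd => !(pvDelSet up).contains pd.1)))
        = up' := by
      rw [hup']
      apply List.map_congr_left
      intro y _
      have : y.2.filter (fun pd => !(pvDelSet up).contains pd.1)
          = y.2.filter (fun pd => !F.contains pd.1) := by
        apply List.filter_congr
        intro pd _
        rw [hFD]
      rw [this]
    -- up is nonempty, so there is fuel left for the loop's second (and last) test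
    have hupne : up ≠ [] := by
      obtain ⟨z, hz⟩ := List.exists_mem_of_ne_nil _ hS
      have hzp : z ∈ pvParents up :=
        List.count_pos_iff.mp (by have := ((hmemF z).mp hz).1; omega)
      intro h
      rw [h] at hzp
      simp [pvParents] at hzp
    obtain ⟨a, t, rfl⟩ := List.exists_cons_of_ne_nil hupne
    -- facts about up'
    have hkeys' : pvKeys up' = pvKeys (a :: t) := by
      simp [pvKeys, hup', List.map_map, Function.comp]
    have hpre' : Pre_remove_dangly_founders up' := by
      constructor
      · have h1 : (up'.map (·.1)) = ((a :: t).map (·.1)) := hkeys'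
        rw [h1]; exact hpre.1
      · intro y' hy'
        obtain ⟨y, hy, rfl⟩ := List.mem_map.mp hy'
        simp only
        rw [show (y.2.filter (fun pd => !F.contains pd.1)).map (·.1)
            = (y.2.map (·.1)).filter (fun p => !F.contains p)
          from pv_map_fst_filter y.2 (fun p => !F.contains p)]
        exact (hpre.2 y hy).filter _
    have hparents' : pvParents up' = (pvParents (a :: t)).filter (fun p => !F.contains p) := by
      rw [hup']
      unfold pvParents
      rw [List.flatMap_map, pv_filter_flatMap]
      congr 1
      funext y
      exact pv_map_fst_filter y.2 (fun p => !F.contains p)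
    have hdel' : ∀ z, ¬ pvDel up' z := by
      intro z hzdel
      obtain ⟨hcnt1, hnk⟩ := hzdel
      rw [hkeys'] at hnk
      by_cases hFz : z ∈ F
      · have : ((pvParents (a :: t)).filter (fun p => !F.contains p)).count z = 0 := by
          rw [List.count_eq_zero]
          intro hm
          have := (List.mem_filter.mp hm).2
          simp [List.contains_eq_mem, hFz] at this
        rw [hparents', this] at hcnt1
        omega
      · have hqz : (fun p : Int => !F.contains p) z = true := by
          simp [List.contains_eq_mem, hFz]
        have hcc : ((pvParents (a :: t)).filter (fun p => !F.contains p)).count z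
            = (pvParents (a :: t)).count z := List.count_filter hqz
        rw [hparents', hcc] at hcnt1
        exact hFz ((hmemF z).mpr ⟨hcnt1, hnk⟩)
    have hS' : pvFidOne up' = [] := by
      rw [List.eq_nil_iff_forall_not_mem]
      intro z hz
      exact hdel' z ((pv_mem_fidOne up' z hpre').mp hz)
    rw [List.length_cons, hloop, hS']
    first
    | simpa using hBup'
    | simpa using hBup'.symm
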